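-- pv_equiv track=rewrite | github.com/rajatvarna/TradingAgents | tradingagents/agents/utils/agent_utils.py | trim_debate_history
-- ===== SOURCE A (Python) =====
-- def trim_debate_history(history: str, max_turns: int = 4) -> str:
--     """Keep only the most recent N turns of the debate to prevent context window overflow.
--     Assumes each turn is prefixed by a known Analyst/Researcher name.
--     """
--     if not history:
--         return ""
--
--     # Split by common prefixes used in the debate
--     prefixes = [
--         "Bull Analyst:", "Bear Analyst:",
--         "Aggressive Analyst:", "Conservative Analyst:", "Neutral Analyst:"
--     ]
--
--     # We can split by lines and look for these prefixes
--     lines = history.split('\n')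
--     turns = []
--     current_turn = []
--
--     for line in lines:
--         is_new_turn = any(line.startswith(p) for p in prefixes)
--         if is_new_turn:
--             if current_turn:
--                 turns.append("\n".join(current_turn))
--             current_turn = [line]
--         else:
--             if current_turn:
--                 current_turn.append(line)
--
--     if current_turn:
--         turns.append("\n".join(current_turn))
--
--     if len(turns) <= max_turns:
--         return history
--
--     truncated = "\n\n...[Earlier history truncated]...\n\n" + "\n".join(turns[-max_turns:])
--     return truncated
-- ===== SOURCE B (Python) =====
-- def trim_debate_history(history: str, max_turns: int = 4) -> str:
--     """Keep only the most recent max_turns turns of the debate (counter-and-filter version)."""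
--     if not history:
--         return ""
--     prefixes = (
--         "Bull Analyst:", "Bear Analyst:",
--         "Aggressive Analyst:", "Conservative Analyst:", "Neutral Analyst:",
--     )
--     lines = history.split('\n')
--     total = sum(line.startswith(prefixes) for line in lines)
--     if total <= max_turns:
--         return history
--     drop = total - max_turns
--     kept = []
--     seen = 0
--     for line in lines:
--         if line.startswith(prefixes):
--             seen += 1
--         if seen > drop:
--             kept.append(line)
--     return "\n\n...[Earlier history truncated]...\n\n" + "\n".join(kept)
-- ===== Notes on version B (the rewrite author's own statement) =====
-- stated objective: alternative
-- what changed: Instead of grouping lines into joined turn-strings and slicing that list, B counts boundary lines in one pass, computes how many leading turns to discard, and filters the kept suffix of lines with a running turn counter, joining once.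
-- intended difference: For max_turns <= 0 when the history contains more than -max_turns turns, A's slice turns[-max_turns:] accidentally keeps turns counted from the FRONT (all of them when max_turns == 0, plus the truncation marker), while B keeps no turns and returns just the truncation marker, which is the intended meaning of keeping at most max_turns most-recent turns. — e.g. on trim_debate_history("Bull Analyst: hi", 0): A returns "\n\n...[Earlier history truncated]...\n\nBull Analyst: hi", B returns "\n\n...[Earlier history truncated]...\n\n"
import Mathlib
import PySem

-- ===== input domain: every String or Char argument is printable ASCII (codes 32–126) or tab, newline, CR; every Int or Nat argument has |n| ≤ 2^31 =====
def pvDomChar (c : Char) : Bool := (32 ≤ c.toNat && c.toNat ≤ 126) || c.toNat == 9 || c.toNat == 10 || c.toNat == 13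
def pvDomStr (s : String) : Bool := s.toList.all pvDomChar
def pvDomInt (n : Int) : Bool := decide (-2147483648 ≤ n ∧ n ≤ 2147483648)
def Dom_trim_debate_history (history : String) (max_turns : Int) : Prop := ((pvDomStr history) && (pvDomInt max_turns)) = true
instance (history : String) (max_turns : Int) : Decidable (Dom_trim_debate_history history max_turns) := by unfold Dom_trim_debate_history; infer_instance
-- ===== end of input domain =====

-- B counts boundary lines and filters the kept suffix with a running turn counter (one join);
-- A groups lines into joined turn strings and slices that list. Equal outside D_ (proved);
-- inside D_ (non-positive max_turns with enough turns) they differ everywhere (proved).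

-- ===== PORT A =====
-- shared literals of both Pythons
def pvPrefixes : List (List Char) :=
  ["Bull Analyst:".toList, "Bear Analyst:".toList,
   "Aggressive Analyst:".toList, "Conservative Analyst:".toList, "Neutral Analyst:".toList]

def pvIsNewTurn (line : List Char) : Bool :=
  pvPrefixes.any (fun p => PySem.Chars.startswith line p)

def pvJoinNL (xs : List (List Char)) : List Char := PySem.Chars.join ['\n'] xs

def pvTrunc : List Char := "\n\n...[Earlier history truncated]...\n\n".toList

-- the body of A's for-loop, state = (turns, current_turn)
def pvStepA (st : List (List Char) × List (List Char)) (line : List Char) :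
    List (List Char) × List (List Char) :=
  if pvIsNewTurn line then
    (if st.2 ≠ [] then st.1 ++ [pvJoinNL st.2] else st.1, [line])
  else
    if st.2 ≠ [] then (st.1, st.2 ++ [line]) else st

-- A's trailing 'if current_turn: turns.append(...)'
def pvFinishA (st : List (List Char) × List (List Char)) : List (List Char) :=
  if st.2 ≠ [] then st.1 ++ [pvJoinNL st.2] else st.1

def trim_debate_history (history : String) (max_turns : Int) : String :=
  if history = "" then ""
  else
    let lines := PySem.Chars.splitOn history.toList ['\n']
    let turns := pvFinishA (lines.foldl pvStepA ([], []))
    if (turns.length : Int) ≤ max_turns then history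
    else String.ofList (pvTrunc ++ pvJoinNL (PySem.List.slice turns (some (-max_turns)) none))

-- ===== PORT B =====
-- the body of B's filtering loop, state = (kept, seen)
def pvStepB (drop : Int) (st : List (List Char) × Int) (line : List Char) :
    List (List Char) × Int :=
  let seen := if pvIsNewTurn line then st.2 + 1 else st.2
  (if drop < seen then st.1 ++ [line] else st.1, seen)

def trim_debate_history_alt (history : String) (max_turns : Int) : String :=
  if history = "" then ""
  else
    let lines := PySem.Chars.splitOn history.toList ['\n']
    let total : Int := (lines.countP pvIsNewTurn : Int)
    if total ≤ max_turns then history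
    else
      let drop : Int := total - max_turns
      let kept := (lines.foldl (pvStepB drop) ([], 0)).1
      String.ofList (pvTrunc ++ pvJoinNL kept)

-- ===== PRECONDITION & SPEC =====
-- For max_turns ≤ 0 when history has more than -max_turns turns, A's slice turns[-max_turns:]
-- accidentally keeps turns counted from the FRONT (all of them when max_turns = 0); B keeps no
-- turns and returns just the truncation marker — the intended meaning of "keep the most recent
-- max_turns turns".
def D_trim_debate_history (history : String) (max_turns : Int) : Prop :=
  max_turns ≤ 0 ∧
    -max_turns < (((PySem.Chars.splitOn history.toList ['\n']).countP pvIsNewTurn : Nat) : Int)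
instance (history : String) (max_turns : Int) : Decidable (D_trim_debate_history history max_turns) := by unfold D_trim_debate_history; infer_instance

def Spec_trim_debate_history (history : String) (max_turns : Int) (out : String) : Prop := ¬ D_trim_debate_history history max_turns → out = trim_debate_history_alt history max_turns
instance (history : String) (max_turns : Int) (out : String) : Decidable (Spec_trim_debate_history history max_turns out) := by unfold Spec_trim_debate_history; infer_instance

def pvDiffWitness_trim_debate_history : String × Int := ("Bull Analyst: hi", 0)
def pvDiffWitnessOut_trim_debate_history : String × String :=
  ("\n\n...[Earlier history truncated]...\n\nBull Analyst: hi",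
   "\n\n...[Earlier history truncated]...\n\n")

-- ===== CLAIM (what is proved, stated in full; the proofs are below) =====
def Claim_unchanged_trim_debate_history : Prop := ∀ (history : String) (max_turns : Int), Dom_trim_debate_history history max_turns → Spec_trim_debate_history history max_turns (trim_debate_history history max_turns)
def Claim_changed_trim_debate_history : Prop := Dom_trim_debate_history (pvDiffWitness_trim_debate_history.1) (pvDiffWitness_trim_debate_history.2) ∧ D_trim_debate_history (pvDiffWitness_trim_debate_history.1) (pvDiffWitness_trim_debate_history.2) ∧ trim_debate_history (pvDiffWitness_trim_debate_history.1) (pvDiffWitness_trim_debate_history.2) = pvDiffWitnessOut_trim_debate_history.1 ∧ trim_debate_history_alt (pvDiffWitness_trim_debate_history.1) (pvDiffWitness_trim_debate_history.2) = pvDiffWitnessOut_trim_debate_history.2 ∧ pvDiffWitnessOut_trim_debate_history.1 ≠ pvDiffWitnessOut_trim_debate_history.2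
def Claim_exact_trim_debate_history : Prop := ∀ (history : String) (max_turns : Int), Dom_trim_debate_history history max_turns → D_trim_debate_history history max_turns → trim_debate_history history max_turns ≠ trim_debate_history_alt history max_turns

-- ===== LEMMAS AND PROOFS =====

-- the common specification: the list of turns, as groups of lines
def pvTurns : List (List Char) → List (List (List Char))
  | [] => []
  | l :: r =>
      if pvIsNewTurn l then
        (l :: r.takeWhile (fun x => !pvIsNewTurn x)) :: pvTurns (r.dropWhile (fun x => !pvIsNewTurn x))
      else pvTurns r
termination_by ls => ls.length
decreasing_by
  · have := List.length_dropWhile_le (fun x => !pvIsNewTurn x) r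
    simp; omega
  · simp

theorem pvFoldA_spec (ls : List (List Char)) : ∀ (t c : List (List Char)),
    pvFinishA (ls.foldl pvStepA (t, c)) =
      t ++ (if c = [] then (pvTurns ls).map pvJoinNL
            else pvJoinNL (c ++ ls.takeWhile (fun x => !pvIsNewTurn x)) ::
                 (pvTurns (ls.dropWhile (fun x => !pvIsNewTurn x))).map pvJoinNL) := by
  induction ls with
  | nil =>
    intro t c
    cases c with
    | nil => simp [pvFinishA, pvTurns]
    | cons x cs => simp [pvFinishA, pvTurns]
  | cons l r ih =>
    intro t c
    by_cases hb : pvIsNewTurn l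
    · cases c with
      | nil =>
        simp only [List.foldl_cons, pvStepA, hb, if_true, ne_eq, not_true_eq_false]
        rw [ih]
        simp [pvTurns, hb]
      | cons x cs =>
        simp only [List.foldl_cons, pvStepA, hb, if_true, ne_eq, reduceCtorEq,
          not_false_eq_true]
        rw [ih]
        simp [pvTurns, hb]
    · cases c with
      | nil =>
        simp only [List.foldl_cons, pvStepA, hb, if_false, Bool.false_eq_true, ne_eq,
          not_true_eq_false]
        rw [ih]
        simp [pvTurns, hb]
      | cons x cs =>
        simp only [List.foldl_cons, pvStepA, hb, Bool.false_eq_true, if_false, ne_eq,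
          reduceCtorEq, not_false_eq_true]
        rw [ih]
        simp [hb]

theorem pvTurns_dropWhile (ls : List (List Char)) :
    pvTurns (ls.dropWhile (fun x => !pvIsNewTurn x)) = pvTurns ls := by
  induction ls with
  | nil => simp
  | cons l r ih =>
    by_cases hb : pvIsNewTurn l
    · simp [hb]
    · simp [hb, ih, pvTurns]

theorem pvTurns_length (ls : List (List Char)) :
    (pvTurns ls).length = ls.countP pvIsNewTurn := by
  induction ls using pvTurns.induct with
  | case1 => simp [pvTurns]
  | case2 l r hb ih =>
    have h0 : (r.takeWhile (fun x => !pvIsNewTurn x)).countP pvIsNewTurn = 0 := by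
      rw [List.countP_eq_zero]
      intro a ha
      have := List.mem_takeWhile_imp ha
      simpa using this
    have hsplit : r.countP pvIsNewTurn
        = (r.dropWhile (fun x => !pvIsNewTurn x)).countP pvIsNewTurn := by
      conv_lhs => rw [← List.takeWhile_append_dropWhile (p := fun x => !pvIsNewTurn x) (l := r)]
      rw [List.countP_append, h0, Nat.zero_add]
    rw [pvTurns, if_pos hb]
    simp [hb, ih, ← hsplit]
  | case3 l r hb ih =>
    rw [pvTurns, if_neg hb, ih]
    simp [hb]

theorem pvTurns_head (ls : List (List Char)) :
    ∀ g ∈ pvTurns ls, ∃ a t, g = a :: t ∧ pvIsNewTurn a = true := by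
  induction ls using pvTurns.induct with
  | case1 => simp [pvTurns]
  | case2 l r hb ih =>
    rw [pvTurns, if_pos hb]
    intro g hg
    rcases List.mem_cons.mp hg with h | h
    · exact ⟨l, _, h, hb⟩
    · exact ih g h
  | case3 l r hb ih =>
    rw [pvTurns, if_neg hb]
    exact ih

theorem pvFoldB_spec (drop : Int) (ls : List (List Char)) :
    ∀ (acc : List (List Char)) (s : Int),
    (ls.foldl (pvStepB drop) (acc, s)).1 =
      acc ++ (if drop < s then ls.takeWhile (fun x => !pvIsNewTurn x) else []) ++
        ((pvTurns (ls.dropWhile (fun x => !pvIsNewTurn x))).drop ((drop - s).toNat)).flatten := by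
  induction ls with
  | nil => intro acc s; simp [pvTurns]
  | cons l r ih =>
    intro acc s
    by_cases hb : pvIsNewTurn l
    · simp only [List.foldl_cons, pvStepB, hb, if_true]
      rw [ih]
      rw [List.dropWhile_cons, List.takeWhile_cons]
      simp only [hb, Bool.not_true, Bool.false_eq_true, if_false, ite_self]
      rw [pvTurns, if_pos hb]
      by_cases hle : drop < s + 1
      · have h1 : (drop - s).toNat = 0 := by omega
        have h2 : (drop - (s + 1)).toNat = 0 := by omega
        rw [h1, h2]
        simp only [if_pos hle, List.drop_zero, List.flatten_cons]
        simp
      · have h1 : (drop - s).toNat = (drop - (s + 1)).toNat + 1 := by omega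
        rw [h1]
        simp only [if_neg hle, List.drop_succ_cons]
    · simp only [List.foldl_cons, pvStepB, hb, Bool.false_eq_true, if_false]
      rw [ih]
      rw [List.dropWhile_cons, List.takeWhile_cons]
      simp only [hb, Bool.not_false, if_true]
      by_cases hle : drop < s
      · simp [hle]
      · simp [hle]

theorem pvJoin_append (X Y : List (List Char)) (hX : X ≠ []) (hY : Y ≠ []) :
    pvJoinNL (X ++ Y) = pvJoinNL X ++ ['\n'] ++ pvJoinNL Y := by
  induction X with
  | nil => simp at hX
  | cons a X' ih =>
    cases X' with
    | nil =>
      cases Y with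
      | nil => simp at hY
      | cons y ys =>
        simp only [List.singleton_append, pvJoinNL]
        rw [PySem.Chars.join_cons_cons, PySem.Chars.join_singleton]
    | cons b X'' =>
      simp only [List.cons_append, pvJoinNL] at ih ⊢
      rw [PySem.Chars.join_cons_cons, PySem.Chars.join_cons_cons,
        ih (by simp)]
      simp

theorem pvTurns_ne_nil (ls : List (List Char)) : ∀ g ∈ pvTurns ls, g ≠ [] := by
  intro g hg
  obtain ⟨a, t, hgat, _⟩ := pvTurns_head ls g hg
  simp [hgat]

theorem pvJoin_flatten (gs : List (List (List Char))) (h : ∀ g ∈ gs, g ≠ []) :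
    pvJoinNL (gs.map pvJoinNL) = pvJoinNL gs.flatten := by
  induction gs with
  | nil => rfl
  | cons g rest ih =>
    cases rest with
    | nil => simp [pvJoinNL, PySem.Chars.join_singleton]
    | cons g2 rs =>
      have hg : g ≠ [] := h g (by simp)
      have hflat : (g2 :: rs).flatten ≠ [] := by
        have : g2 ≠ [] := h g2 (by simp)
        cases g2 with
        | nil => simp at this
        | cons x xs => simp
      simp only [List.map_cons, List.flatten_cons] at *
      rw [pvJoinNL, PySem.Chars.join_cons_cons, ← pvJoinNL]
      show pvJoinNL g ++ ['\n'] ++ pvJoinNL ((g2::rs).map pvJoinNL) = _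
      rw [show List.map pvJoinNL (g2 :: rs) = pvJoinNL g2 :: List.map pvJoinNL rs from rfl,
        ih (fun g hgm => h g (by simp [hgm]))]
      rw [pvJoin_append g (g2 ++ rs.flatten) hg hflat]

theorem pv_main (history : String) (max_turns : Int)
    (hD : ¬ D_trim_debate_history history max_turns) :
    trim_debate_history history max_turns = trim_debate_history_alt history max_turns := by
  unfold trim_debate_history trim_debate_history_alt
  by_cases h0 : history = ""
  · simp [h0]
  · simp only [if_neg h0]
    have hturns : pvFinishA ((PySem.Chars.splitOn history.toList ['\n']).foldl pvStepA ([], []))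
        = (pvTurns (PySem.Chars.splitOn history.toList ['\n'])).map pvJoinNL := by
      simpa using pvFoldA_spec (PySem.Chars.splitOn history.toList ['\n']) [] []
    rw [hturns]
    generalize hls : PySem.Chars.splitOn history.toList ['\n'] = ls
    rw [List.length_map, pvTurns_length]
    by_cases hc : ((ls.countP pvIsNewTurn : Nat) : Int) ≤ max_turns
    · rw [if_pos hc, if_pos hc]
    · rw [if_neg hc, if_neg hc]
      congr 1
      congr 1
      -- B's filtered lines are the flattened kept turns
      rw [pvFoldB_spec]
      rw [if_neg (by omega), pvTurns_dropWhile]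
      simp only [Int.sub_zero, List.nil_append]
      -- A's slice of the turn-string list drops the same turns
      have hslice : PySem.List.slice ((pvTurns ls).map pvJoinNL) (some (-max_turns)) none
          = ((pvTurns ls).drop ((((ls.countP pvIsNewTurn : Nat) : Int) - max_turns).toNat)).map pvJoinNL := by
        by_cases hmt : 0 < max_turns
        · rw [show (-max_turns) = -((max_turns.toNat : Nat) : Int) by omega]
          rw [PySem.List.slice_from_neg_natCast _ _ (by omega)]
          rw [List.map_drop]
          congr 1
          rw [List.length_map, pvTurns_length]
          have hle := hc
          omega
        · -- outside D_ with max_turns ≤ 0 we have count ≤ -max_turns: both drops empty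
          unfold D_trim_debate_history at hD
          rw [hls] at hD
          have hcnt : (((ls.countP pvIsNewTurn : Nat)) : Int) ≤ -max_turns := by
            by_contra hx
            exact hD ⟨by omega, by omega⟩
          rw [PySem.List.slice_from _ (by omega)]
          rw [List.drop_eq_nil_of_le (by rw [List.length_map, pvTurns_length]; omega),
            List.drop_eq_nil_of_le (by rw [pvTurns_length]; omega)]
          rfl
      rw [hslice]
      exact pvJoin_flatten _ (fun g hg => pvTurns_ne_nil ls g (List.mem_of_mem_drop hg))

theorem pvOfList_inj (a b : List Char) (h : String.ofList a = String.ofList b) : a = b := by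
  have := congrArg String.toList h
  simpa using this

theorem pvJoin_ne_nil (gs : List (List Char)) (hne : gs ≠ [])
    (h : ∀ g ∈ gs, g ≠ []) : pvJoinNL gs ≠ [] := by
  cases gs with
  | nil => simp at hne
  | cons g rest =>
    cases rest with
    | nil =>
      have := h g (by simp)
      simpa [pvJoinNL, PySem.Chars.join_singleton] using this
    | cons g2 rs =>
      rw [pvJoinNL, PySem.Chars.join_cons_cons]
      have := h g (by simp)
      simp

-- ===== VERDICT (by name: the statements are the Claim_ definitions above) =====
theorem trim_debate_history_spec : Claim_unchanged_trim_debate_history := by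
  intro history max_turns _h
  unfold Spec_trim_debate_history
  intro hD
  exact pv_main history max_turns hD

theorem trim_debate_history_changed : Claim_changed_trim_debate_history := by
  unfold Claim_changed_trim_debate_history; decide

theorem trim_debate_history_tight : Claim_exact_trim_debate_history := by
  intro history max_turns _h hD
  obtain ⟨hmt, hcnt⟩ := hD
  by_cases h0 : history = ""
  · exfalso
    subst h0
    have : (((PySem.Chars.splitOn ("" : String).toList ['\n']).countP pvIsNewTurn : Nat) : Int) = 0 := by decide
    omega
  · unfold trim_debate_history trim_debate_history_alt
    simp only [if_neg h0]
    have hturns : pvFinishA ((PySem.Chars.splitOn history.toList ['\n']).foldl pvStepA ([], []))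
        = (pvTurns (PySem.Chars.splitOn history.toList ['\n'])).map pvJoinNL := by
      simpa using pvFoldA_spec (PySem.Chars.splitOn history.toList ['\n']) [] []
    rw [hturns]
    generalize hls : PySem.Chars.splitOn history.toList ['\n'] = ls
    rw [hls] at hcnt
    rw [List.length_map, pvTurns_length]
    have hc : ¬ ((ls.countP pvIsNewTurn : Nat) : Int) ≤ max_turns := by omega
    rw [if_neg hc, if_neg hc]
    -- B keeps nothing
    rw [pvFoldB_spec]
    have hdropB : (pvTurns (ls.dropWhile (fun x => !pvIsNewTurn x))).length
        ≤ ((((ls.countP pvIsNewTurn : Nat) : Int) - max_turns - 0)).toNat := by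
      rw [pvTurns_dropWhile, pvTurns_length]
      omega
    rw [if_neg (by omega), List.drop_eq_nil_of_le hdropB]
    -- A keeps at least one turn, whose first line is a nonempty boundary line
    rw [PySem.List.slice_from _ (by omega)]
    intro heq
    have heq' := pvOfList_inj _ _ heq
    simp only [List.flatten_nil, List.append_nil] at heq'
    have hjoin : pvJoinNL (((pvTurns ls).map pvJoinNL).drop (-max_turns).toNat) = [] := by
      have h2 := List.append_cancel_left heq'
      simpa [pvJoinNL, PySem.Chars.join_nil] using h2
    apply pvJoin_ne_nil _ _ _ hjoin
    · intro hnil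
      have := congrArg List.length hnil
      rw [List.length_drop, List.length_map, pvTurns_length] at this
      simp at this
      omega
    · intro g hg
      have hg' := List.mem_of_mem_drop hg
      obtain ⟨x, hx, hxg⟩ := List.mem_map.mp hg'
      obtain ⟨a, t, hat, hbd⟩ := pvTurns_head ls x hx
      subst hxg
      subst hat
      cases t with
      | nil =>
        have : a ≠ [] := by
          intro hae; subst hae; exact absurd hbd (by decide)
        simpa [pvJoinNL, PySem.Chars.join_singleton] using this
      | cons b bs =>
        rw [pvJoinNL, PySem.Chars.join_cons_cons]
        simp
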